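-- pv_equiv track=rewrite | github.com/nidhitvaishnav/NLP_Ngram_POS | nGram.py | createBucket
-- ===== SOURCE A (Python) =====
-- def createBucket(biGramList, biGramDict, unigramCount, biGramCount):
--     '''
--
--     '''
--     bucketDict = {}
--     for tup in biGramDict:
--
--         count = biGramDict[tup]
--         if count in bucketDict:
--             bucketDict[count]+=1
--         else:
--             bucketDict[count]=1
--         #if -ends
--     #for tup -ends
--     bucketDict[0]=unigramCount*unigramCount-biGramCount
--     return bucketDict
-- ===== SOURCE B (Python) =====
-- def createBucket(biGramList, biGramDict, unigramCount, biGramCount):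
--     # repeated-partition scheme: peel off the first remaining count value,
--     # measure how many copies it has by filtering them all out, repeat on the rest
--     bucketDict = {}
--     vals = list(biGramDict.values())
--     while vals:
--         v = vals[0]
--         rest = [x for x in vals if x != v]
--         bucketDict[v] = len(vals) - len(rest)
--         vals = rest
--     bucketDict[0] = unigramCount * unigramCount - biGramCount
--     return bucketDict
-- ===== Notes on version B (the rewrite author's own statement) =====
-- stated objective: alternative
-- what changed: B replaces A's single hash-counting pass (membership test + in-place increment per dict entry) by a repeated-partition scheme: it extracts the values list and, while it is nonempty, takes the first remaining value, filters out all its copies, and records the length difference as that value's bucket, iterating on the filtered remainder.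
import Mathlib
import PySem

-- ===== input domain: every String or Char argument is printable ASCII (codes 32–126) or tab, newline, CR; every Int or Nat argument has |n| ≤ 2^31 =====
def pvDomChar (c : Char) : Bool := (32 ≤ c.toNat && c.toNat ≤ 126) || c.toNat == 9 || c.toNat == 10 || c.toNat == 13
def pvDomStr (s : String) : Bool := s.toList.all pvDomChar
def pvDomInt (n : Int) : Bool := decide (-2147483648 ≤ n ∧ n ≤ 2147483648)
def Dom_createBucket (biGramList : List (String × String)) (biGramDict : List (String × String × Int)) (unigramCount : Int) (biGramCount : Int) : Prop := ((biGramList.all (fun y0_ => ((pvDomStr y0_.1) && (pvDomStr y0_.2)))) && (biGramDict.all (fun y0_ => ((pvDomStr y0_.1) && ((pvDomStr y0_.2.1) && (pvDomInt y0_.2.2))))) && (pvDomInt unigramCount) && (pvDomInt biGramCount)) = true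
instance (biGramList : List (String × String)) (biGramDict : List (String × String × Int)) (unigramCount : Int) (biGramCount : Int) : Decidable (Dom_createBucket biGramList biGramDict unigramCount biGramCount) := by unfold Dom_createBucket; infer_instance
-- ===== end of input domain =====

-- B is an alternative (not faster) algorithm: instead of A's single hash-counting pass it
-- repeatedly partitions the values list, peeling off all copies of the first remaining value.

-- ===== PORT A =====
-- A iterates over the keys of biGramDict and looks each key up ('count = biGramDict[tup]');
-- the key is always present, so the lookup is 'getD _ 0' (= get? with the impossible KeyError).
def createBucket (biGramList : List (String × String)) (biGramDict : List (String × String × Int)) (unigramCount : Int) (biGramCount : Int) : List (Int × Int) :=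
  let d : PySem.Dict (String × String) Int :=
    PySem.Dict.mk (biGramDict.map (fun p => ((p.1, p.2.1), p.2.2)))
  let bucket : PySem.Dict Int Int :=
    d.keys.foldl (fun b tup =>
      let count := d.getD tup 0
      if b.contains count then b.insert count (b.getD count 0 + 1)
      else b.insert count 1) PySem.Dict.empty
  (bucket.insert 0 (unigramCount * unigramCount - biGramCount)).items

-- ===== PORT B =====
-- the 'while vals:' loop of Source B: peel off the first value, filter out its copies, recurse
def pvBucketLoop : PySem.Dict Int Int → List Int → PySem.Dict Int Int
  | bucket, [] => bucket
  | bucket, v :: t =>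
    let rest := (v :: t).filter (fun x => x != v)
    pvBucketLoop (bucket.insert v ((((v :: t).length : Nat) : Int) - (rest.length : Int))) rest
  termination_by _ vals => vals.length
  decreasing_by
    simp only [List.filter_cons, bne_self_eq_false, if_neg, List.length_cons, Bool.false_eq_true,
      not_false_eq_true]
    exact Nat.lt_succ_of_le (List.length_filter_le _ _)

def createBucket_alt (biGramList : List (String × String)) (biGramDict : List (String × String × Int)) (unigramCount : Int) (biGramCount : Int) : List (Int × Int) :=
  let vals : List Int := biGramDict.map (fun p => p.2.2)
  let bucket : PySem.Dict Int Int := pvBucketLoop PySem.Dict.empty vals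
  (bucket.insert 0 (unigramCount * unigramCount - biGramCount)).items

-- ===== PRECONDITION & SPEC =====
-- Pre_ excludes association lists with duplicate (String × String) keys: a Python dict cannot
-- contain them, so such lists do not represent any input A actually receives (their first-vs-last
-- value reading is a representational ambiguity, not a behaviour of A).
def Pre_createBucket (biGramList : List (String × String)) (biGramDict : List (String × String × Int)) (unigramCount : Int) (biGramCount : Int) : Prop :=
  (biGramDict.map (fun p => (p.1, p.2.1))).Nodup
instance (biGramList : List (String × String)) (biGramDict : List (String × String × Int)) (unigramCount : Int) (biGramCount : Int) : Decidable (Pre_createBucket biGramList biGramDict unigramCount biGramCount) := by unfold Pre_createBucket; infer_instance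
def pvWitness_createBucket : (List (String × String)) × (List (String × String × Int)) × Int × Int :=
  ([("a", "b")], [("a", "b", 2), ("c", "d", 2), ("a", "d", 1)], 2, 1)

def Spec_createBucket (biGramList : List (String × String)) (biGramDict : List (String × String × Int)) (unigramCount : Int) (biGramCount : Int) (out : List (Int × Int)) : Prop := out = createBucket_alt biGramList biGramDict unigramCount biGramCount
instance (biGramList : List (String × String)) (biGramDict : List (String × String × Int)) (unigramCount : Int) (biGramCount : Int) (out : List (Int × Int)) : Decidable (Spec_createBucket biGramList biGramDict unigramCount biGramCount out) := by unfold Spec_createBucket; infer_instance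

-- ===== CLAIM (what is proved, stated in full; the proofs are below) =====
def Claim_equal_createBucket : Prop := ∀ (biGramList : List (String × String)) (biGramDict : List (String × String × Int)) (unigramCount : Int) (biGramCount : Int), Dom_createBucket biGramList biGramDict unigramCount biGramCount → Pre_createBucket biGramList biGramDict unigramCount biGramCount → Spec_createBucket biGramList biGramDict unigramCount biGramCount (createBucket biGramList biGramDict unigramCount biGramCount)

-- ===== LEMMAS AND PROOFS =====

-- A's counting loop body is the standard counter step: when the key is absent, getD is 0.
lemma stepA_eq_counter_step (b : PySem.Dict Int Int) (c : Int) :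
    (if b.contains c then b.insert c (b.getD c 0 + 1) else b.insert c 1)
      = b.insert c (b.getD c 0 + 1) := by
  by_cases h : b.contains c = true
  · simp [h]
  · simp only [Bool.not_eq_true] at h
    rw [PySem.Dict.getD_of_not_contains b 0 h]
    simp [h]

-- adding elements already present to a set is a no-op: folding add over t skips the v's once v is in s
lemma foldl_add_filter_ne (t : List Int) (v : Int) :
    ∀ s : List Int, v ∈ s →
      t.foldl PySem.Set.add s = (t.filter (fun x => x != v)).foldl PySem.Set.add s := by
  induction t with
  | nil => intro s _; rfl
  | cons a t ih =>
    intro s hv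
    by_cases ha : a = v
    · subst ha
      have : PySem.Set.add s a = s := by
        simp [PySem.Set.add, hv]
      simp only [List.foldl_cons, List.filter_cons, bne_self_eq_false, if_neg,
        Bool.false_eq_true, not_false_eq_true, this]
      exact ih s hv
    · have hne : (a != v) = true := by simpa using ha
      simp only [List.foldl_cons, List.filter_cons, hne, if_pos]
      exact ih (PySem.Set.add s a) (by rw [PySem.Set.mem_add]; exact Or.inl hv)

-- a head element absent from the rest of the fold can be pulled out in front
lemma foldl_add_cons_of_not_mem (t : List Int) (x : Int) (hx : x ∉ t) :
    ∀ s : List Int, t.foldl PySem.Set.add (x :: s) = x :: t.foldl PySem.Set.add s := by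
  induction t with
  | nil => intro s; rfl
  | cons a t ih =>
    intro s
    have hax : a ≠ x := fun h => hx (h ▸ List.mem_cons_self)
    have hstep : PySem.Set.add (x :: s) a = x :: PySem.Set.add s a := by
      simp only [PySem.Set.add, PySem.Set.contains_eq_listContains]
      by_cases hm : a ∈ s
      · simp [List.contains_eq_mem, hm, hax]
      · simp [List.contains_eq_mem, hm, hax]
    simp only [List.foldl_cons, hstep]
    exact ih (fun h => hx (List.mem_cons_of_mem _ h)) _

-- dedup of a cons = head, then dedup of the tail with all copies of the head removed
lemma dedup_cons_filter (v : Int) (t : List Int) :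
    PySem.List.dedup (v :: t) = v :: PySem.List.dedup (t.filter (fun x => x != v)) := by
  have h1 : PySem.Set.ofList (v :: t) = t.foldl PySem.Set.add [v] := by
    simp [PySem.Set.ofList]
  have h2 : PySem.Set.ofList (t.filter (fun x => x != v))
      = (t.filter (fun x => x != v)).foldl PySem.Set.add [] := by
    simp [PySem.Set.ofList]
  have hnm : v ∉ t.filter (fun x => x != v) := by
    intro h
    rcases List.mem_filter.mp h with ⟨_, hb⟩
    simp at hb
  calc PySem.List.dedup (v :: t)
      = t.foldl PySem.Set.add [v] := by rw [PySem.List.dedup_eq_ofList, h1]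
    _ = (t.filter (fun x => x != v)).foldl PySem.Set.add [v] :=
        foldl_add_filter_ne t v [v] (List.mem_singleton.mpr rfl)
    _ = v :: (t.filter (fun x => x != v)).foldl PySem.Set.add [] :=
        foldl_add_cons_of_not_mem _ v hnm []
    _ = v :: PySem.List.dedup (t.filter (fun x => x != v)) := by
        rw [PySem.List.dedup_eq_ofList, h2]

-- B's loop produces exactly the counter of vals (items in first-occurrence order)
lemma pvBucketLoop_items (d : PySem.Dict Int Int) (vals : List Int)
    (h : ∀ v ∈ vals, d.contains v = false) :
    (pvBucketLoop d vals).items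
      = d.items ++ (PySem.List.dedup vals).map (fun k => (k, (vals.count k : Int))) := by
  induction d, vals using pvBucketLoop.induct with
  | case1 d => simp [pvBucketLoop, PySem.List.dedup_eq_ofList, PySem.Set.ofList]
  | case2 d v t rest ih =>
    have hrest : rest = t.filter (fun x => x != v) := by
      simp [rest]
    have hmem : ∀ x ∈ rest, x ∈ t ∧ x ≠ v := by
      intro x hx
      rw [hrest] at hx
      rcases List.mem_filter.mp hx with ⟨h1, h2⟩
      exact ⟨h1, by simpa using h2⟩
    have hins : ∀ x ∈ rest, (d.insert v ((((v :: t).length : Nat) : Int)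
        - (rest.length : Int))).contains x = false := by
      intro x hx
      rcases hmem x hx with ⟨hxt, hxv⟩
      rw [PySem.Dict.contains_insert]
      have : d.contains x = false := h x (List.mem_cons_of_mem _ hxt)
      simp [this, hxv]
    have hdv : d.contains v = false := h v List.mem_cons_self
    have hcount : ((((v :: t).length : Nat) : Int) - (rest.length : Int))
        = (((v :: t).count v : Nat) : Int) := by
      have hpe : (fun x : Int => x != v) = (fun x : Int => !(x == v)) := by
        funext x; simp [bne]
      have h1 : rest.length = t.countP (fun x => x != v) := by
        rw [hrest, ← List.countP_eq_length_filter]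
      have h3 : t.length = t.count v + t.countP (fun x => x != v) := by
        rw [hpe]
        simpa [List.count] using
          List.length_eq_countP_add_countP (p := fun x : Int => x == v) (l := t)
      have h2 : (v :: t).count v = t.count v + 1 := by simp
      simp only [List.length_cons]
      omega
    have hcnt : ∀ k ∈ PySem.List.dedup rest,
        ((rest.count k : Nat) : Int) = (((v :: t).count k : Nat) : Int) := by
      intro k hk
      have hk' : k ∈ rest := by
        have := hk
        rw [PySem.List.dedup_eq_ofList] at this
        simpa [PySem.Set.mem_ofList] using this
      rcases hmem k hk' with ⟨_, hkv⟩
      have hp : (k != v) = true := by simpa using hkv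
      have e1 : rest.count k = t.count k := by
        rw [hrest]; exact List.count_filter (p := fun x => x != v) hp
      have e2 : (v :: t).count k = t.count k := by
        simp [Ne.symm hkv]
      rw [e1, e2]
    rw [pvBucketLoop]
    rw [ih hins, PySem.Dict.items_insert, if_neg (by simp [hdv]), hcount]
    have hmapeq : (PySem.List.dedup rest).map (fun k => (k, ((rest.count k : Nat) : Int)))
        = (PySem.List.dedup rest).map (fun k => (k, (((v :: t).count k : Nat) : Int))) :=
      List.map_congr_left (fun k hk => by rw [hcnt k hk])
    rw [hmapeq]
    conv_rhs => rw [dedup_cons_filter v t, ← hrest]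
    simp only [List.map_cons, List.append_assoc, List.singleton_append]

lemma pvBucketLoop_eq_counter (vals : List Int) :
    pvBucketLoop PySem.Dict.empty vals = PySem.Dict.counter vals := by
  apply PySem.Dict.ext
  rw [PySem.Dict.items_counter,
      pvBucketLoop_items PySem.Dict.empty vals (fun v _ => PySem.Dict.contains_empty v)]
  simp [PySem.Dict.empty, PySem.List.dedup_eq_ofList]

-- A's bucket dict equals B's (under Nodup keys of the input dict)
lemma bucket_eq (biGramDict : List (String × String × Int))
    (hnd : (biGramDict.map (fun p => (p.1, p.2.1))).Nodup) :
    ((PySem.Dict.mk (biGramDict.map (fun p => ((p.1, p.2.1), p.2.2)))).keys.foldl (fun b tup =>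
      let count := (PySem.Dict.mk (biGramDict.map (fun p => ((p.1, p.2.1), p.2.2)))).getD tup 0
      if b.contains count then b.insert count (b.getD count 0 + 1)
      else b.insert count 1) PySem.Dict.empty)
    = pvBucketLoop PySem.Dict.empty (biGramDict.map (fun p => p.2.2)) := by
  set d : PySem.Dict (String × String) Int :=
    PySem.Dict.mk (biGramDict.map (fun p => ((p.1, p.2.1), p.2.2))) with hd
  set vals : List Int := biGramDict.map (fun p => p.2.2) with hv
  have hkeys : d.keys = biGramDict.map (fun p => (p.1, p.2.1)) := by
    simp [hd, PySem.Dict.keys, List.map_map, Function.comp]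
  have hknd : d.keys.Nodup := by rw [hkeys]; exact hnd
  have hvals : d.values = vals := by
    simp [hd, hv, PySem.Dict.values, List.map_map, Function.comp]
  have hA : d.keys.foldl (fun (b : PySem.Dict Int Int) tup =>
      let count := d.getD tup 0
      if b.contains count then b.insert count (b.getD count 0 + 1)
      else b.insert count 1) PySem.Dict.empty
      = vals.foldl (fun (b : PySem.Dict Int Int) x => b.insert x (b.getD x 0 + 1)) PySem.Dict.empty := by
    have hmap : d.keys.map (fun k => d.getD k 0) = vals := by
      rw [← hvals]; exact (PySem.Dict.values_eq_map_keys d hknd 0).symm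
    calc d.keys.foldl (fun (b : PySem.Dict Int Int) tup =>
          let count := d.getD tup 0
          if b.contains count then b.insert count (b.getD count 0 + 1)
          else b.insert count 1) PySem.Dict.empty
        = (d.keys.map (fun k => d.getD k 0)).foldl (fun (b : PySem.Dict Int Int) c =>
            if b.contains c then b.insert c (b.getD c 0 + 1)
            else b.insert c 1) PySem.Dict.empty := by
          rw [List.foldl_map]
      _ = (d.keys.map (fun k => d.getD k 0)).foldl
            (fun (b : PySem.Dict Int Int) c => b.insert c (b.getD c 0 + 1)) PySem.Dict.empty := by
          congr 1; funext b c; exact stepA_eq_counter_step b c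
      _ = vals.foldl (fun b c => b.insert c (b.getD c 0 + 1)) PySem.Dict.empty := by
          rw [hmap]
  rw [hA, PySem.Dict.foldl_insert_getD_add_one_eq_counter, pvBucketLoop_eq_counter]

-- ===== VERDICT (by name: the statement is the Claim_ definition above) =====
theorem createBucket_spec : Claim_equal_createBucket := by
  intro biGramList biGramDict unigramCount biGramCount _hdom hpre
  unfold Spec_createBucket createBucket createBucket_alt
  have h := bucket_eq biGramDict hpre
  simp only at h ⊢
  rw [h]
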